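-- pv_equiv track=rewrite | github.com/Hkntndgd/Guess_my_number | util.py | temp_possible_finder
-- ===== SOURCE A (Python) =====
-- import copy
--
-- def temp_possible_finder(possible,in_place_dict,out_place_dict,last_guess_figure):
--     temp_possible_len_dict = {}
--     temp_possible = copy.deepcopy(possible)
--     for index in range(5):
--         for value in list(in_place_dict.values()):
--
--             try:
--                 temp_possible[index].remove(int(value))
--             except:
--                 pass
--
--         for value in list(out_place_dict.values()):
--
--             try:
--                 temp_possible[index].remove(int(value))
--             except:
--                 pass
--         try:
--
--             temp_possible[index].remove(int(last_guess_figure[index]))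
--         except:
--             pass
--         temp_possible_len_dict[index] = len(temp_possible[index])
--     return temp_possible,temp_possible_len_dict
-- ===== SOURCE B (Python) =====
-- def temp_possible_finder(possible, in_place_dict, out_place_dict, last_guess_figure):
--     # one precomputed removal counter + single filtering pass per row (no repeated .remove scans)
--     base = {}
--     for v in list(in_place_dict.values()) + list(out_place_dict.values()):
--         try:
--             n = int(v)
--         except ValueError:
--             continue
--         base[n] = base.get(n, 0) + 1
--     temp_possible = []
--     lens = {}
--     for index in range(5):
--         cnt = dict(base)
--         try:
--             d = int(last_guess_figure[index])
--             cnt[d] = cnt.get(d, 0) + 1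
--         except (ValueError, IndexError):
--             pass
--         row = []
--         for x in possible[index]:
--             if cnt.get(x, 0) > 0:
--                 cnt[x] -= 1
--             else:
--                 row.append(x)
--         temp_possible.append(row)
--         lens[index] = len(row)
--     temp_possible.extend(list(r) for r in possible[5:])
--     return temp_possible, lens
-- ===== Notes on version B (the rewrite author's own statement) =====
-- stated objective: alternative
-- what changed: Replaces A's per-index rescanning of both dicts with repeated list.remove calls by one precomputed removal counter (value -> multiplicity) and a single counter-consuming filtering pass per row.
import Mathlib
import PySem

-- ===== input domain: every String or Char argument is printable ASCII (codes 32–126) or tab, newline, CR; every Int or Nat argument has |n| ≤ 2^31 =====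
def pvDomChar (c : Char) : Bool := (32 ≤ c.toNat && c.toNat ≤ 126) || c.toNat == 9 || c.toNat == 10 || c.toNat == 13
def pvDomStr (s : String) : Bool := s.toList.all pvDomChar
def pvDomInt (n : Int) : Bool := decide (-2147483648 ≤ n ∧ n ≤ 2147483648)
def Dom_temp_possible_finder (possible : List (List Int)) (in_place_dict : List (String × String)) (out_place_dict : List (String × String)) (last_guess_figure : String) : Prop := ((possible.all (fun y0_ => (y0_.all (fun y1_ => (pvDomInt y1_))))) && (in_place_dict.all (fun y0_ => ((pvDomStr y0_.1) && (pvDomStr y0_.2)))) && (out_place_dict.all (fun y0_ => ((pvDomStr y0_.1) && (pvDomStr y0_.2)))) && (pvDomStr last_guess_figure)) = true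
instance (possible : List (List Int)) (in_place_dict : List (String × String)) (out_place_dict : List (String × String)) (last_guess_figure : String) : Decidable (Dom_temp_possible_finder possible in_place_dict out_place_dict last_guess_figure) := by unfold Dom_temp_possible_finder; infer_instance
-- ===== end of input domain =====

-- B replaces A's per-index rescanning of both dicts with repeated list.remove by one precomputed
-- removal counter and a single filtering pass per row (objective: simpler/alternative decomposition).

-- ===== PORT A =====
-- 'try: row.remove(int(v)) except: pass' for one dict value v
def pvRemOrKeep (l : List Int) (v : String) : List Int :=
  match PySem.Int.ofStr? v with
  | none => l
  | some n => (PySem.List.remove? l n).getD l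

def temp_possible_finder (possible : List (List Int)) (in_place_dict : List (String × String)) (out_place_dict : List (String × String)) (last_guess_figure : String) : List (List Int) × (List (Int × Int)) :=
  let inVals := (PySem.Dict.ofList in_place_dict).values
  let outVals := (PySem.Dict.ofList out_place_dict).values
  (PySem.List.pyRange 0 5 1).foldl
    (fun (st : List (List Int) × List (Int × Int)) index =>
      -- temp_possible[index].remove(...) mutates the row in place; ported as read row / fold / write back
      let row0 := (PySem.List.pyGet? st.1 index).getD []   -- in range under Pre_
      let row1 := inVals.foldl pvRemOrKeep row0
      let row2 := outVals.foldl pvRemOrKeep row1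
      let row3 :=
        match PySem.Str.pyGet? last_guess_figure index with
        | none => row2                                    -- IndexError caught by 'except: pass'
        | some c =>
          match PySem.Int.ofChars? [c] with
          | none => row2                                  -- ValueError caught
          | some n => (PySem.List.remove? row2 n).getD row2
      (st.1.set index.toNat row3, st.2 ++ [(index, (row3.length : Int))]))
    (possible, [])

-- ===== PORT B =====
-- base[n] = base.get(n, 0) + 1 for each int-convertible dict value
def pvBumpIf (d : PySem.Dict Int Int) (v : String) : PySem.Dict Int Int :=
  match PySem.Int.ofStr? v with
  | none => d
  | some n => d.insert n (d.getD n 0 + 1)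

-- the single filtering pass over one row, consuming the counter
def pvFilterStep (p : List Int × PySem.Dict Int Int) (x : Int) : List Int × PySem.Dict Int Int :=
  if p.2.getD x 0 > 0 then (p.1, p.2.insert x (p.2.getD x 0 - 1)) else (p.1 ++ [x], p.2)

def temp_possible_finder_alt (possible : List (List Int)) (in_place_dict : List (String × String)) (out_place_dict : List (String × String)) (last_guess_figure : String) : List (List Int) × (List (Int × Int)) :=
  let base := ((PySem.Dict.ofList in_place_dict).values ++ (PySem.Dict.ofList out_place_dict).values).foldl pvBumpIf PySem.Dict.empty
  let st := (PySem.List.pyRange 0 5 1).foldl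
    (fun (st : List (List Int) × List (Int × Int)) index =>
      let cnt :=
        match PySem.Str.pyGet? last_guess_figure index with
        | none => base
        | some c =>
          match PySem.Int.ofChars? [c] with
          | none => base
          | some n => base.insert n (base.getD n 0 + 1)
      let row := (((PySem.List.pyGet? possible index).getD []).foldl pvFilterStep ([], cnt)).1
      (st.1 ++ [row], st.2 ++ [(index, (row.length : Int))]))
    ([], [])
  (st.1 ++ PySem.List.slice possible (some 5) none, st.2)

-- ===== PRECONDITION & SPEC =====
-- A raises IndexError (len(temp_possible[index]) for index < 5) when possible has fewer than 5 rows
def Pre_temp_possible_finder (possible : List (List Int)) (in_place_dict : List (String × String)) (out_place_dict : List (String × String)) (last_guess_figure : String) : Prop := 5 ≤ possible.length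
instance (possible : List (List Int)) (in_place_dict : List (String × String)) (out_place_dict : List (String × String)) (last_guess_figure : String) : Decidable (Pre_temp_possible_finder possible in_place_dict out_place_dict last_guess_figure) := by unfold Pre_temp_possible_finder; infer_instance

def pvWitness_temp_possible_finder : List (List Int) × (List (String × String)) × (List (String × String)) × String :=
  ([[1,2,3],[4],[5,5,7],[],[9,0]], [("a","5")], [("b","9"),("c","x")], "21")

def Spec_temp_possible_finder (possible : List (List Int)) (in_place_dict : List (String × String)) (out_place_dict : List (String × String)) (last_guess_figure : String) (out : List (List Int) × (List (Int × Int))) : Prop := out = temp_possible_finder_alt possible in_place_dict out_place_dict last_guess_figure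
instance (possible : List (List Int)) (in_place_dict : List (String × String)) (out_place_dict : List (String × String)) (last_guess_figure : String) (out : List (List Int) × (List (Int × Int))) : Decidable (Spec_temp_possible_finder possible in_place_dict out_place_dict last_guess_figure out) := by unfold Spec_temp_possible_finder; infer_instance

-- ===== CLAIM (what is proved, stated in full; the proofs are below) =====
def Claim_equal_temp_possible_finder : Prop := ∀ (possible : List (List Int)) (in_place_dict : List (String × String)) (out_place_dict : List (String × String)) (last_guess_figure : String), Dom_temp_possible_finder possible in_place_dict out_place_dict last_guess_figure → Pre_temp_possible_finder possible in_place_dict out_place_dict last_guess_figure → Spec_temp_possible_finder possible in_place_dict out_place_dict last_guess_figure (temp_possible_finder possible in_place_dict out_place_dict last_guess_figure)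

-- ===== LEMMAS AND PROOFS =====

-- abstract counter filter: drop the first (c v) occurrences of each value v
def pvCFilter (c : Int → Nat) : List Int → List Int
  | [] => []
  | x :: xs => if 0 < c x then pvCFilter (fun v => if v = x then c v - 1 else c v) xs
               else x :: pvCFilter c xs

-- 'remove first occurrence of r, or keep l' used by A
def pvRem (l : List Int) (r : Int) : List Int := (PySem.List.remove? l r).getD l

theorem pvCFilter_zero (l : List Int) : pvCFilter (fun _ => 0) l = l := by
  induction l with
  | nil => rfl
  | cons x xs ih => simp [pvCFilter, ih]

theorem pvCFilter_rem (l : List Int) (c : Int → Nat) (r : Int) :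
    pvCFilter c (pvRem l r) = pvCFilter (fun v => if v = r then c v + 1 else c v) l := by
  induction l generalizing c with
  | nil => rfl
  | cons x xs ih =>
    by_cases hx : x = r
    · subst hx
      have h1 : pvRem (x :: xs) x = xs := by simp [pvRem]
      rw [h1]
      have h2 : (fun v => if v = x then (if v = x then c v + 1 else c v) - 1 else (if v = x then c v + 1 else c v)) = c := by
        funext v; by_cases hv : v = x <;> simp [hv]
      simp [pvCFilter, h2]
    · have h1 : pvRem (x :: xs) r = x :: pvRem xs r := by
        rw [pvRem, PySem.List.remove?_cons_of_ne xs hx]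
        cases h : PySem.List.remove? xs r <;> simp [pvRem, h]
      rw [h1]
      have hcx : (if x = r then c x + 1 else c x) = c x := by simp [hx]
      simp only [pvCFilter, hcx]
      by_cases hc : 0 < c x
      · rw [if_pos hc, if_pos hc, ih]
        congr 1
        funext v
        by_cases hv : v = r
        · have hv2 : ¬ v = x := by rw [hv]; exact fun h => hx h.symm
          simp [hv, (show ¬ r = x from fun h => hx h.symm)]
        · by_cases hv2 : v = x <;> simp [hv, hv2, hx]
      · rw [if_neg hc, if_neg hc, ih]

theorem pvFoldlRem_cfilter_gen (rs : List Int) (c : Int → Nat) (l : List Int) :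
    pvCFilter c (rs.foldl pvRem l) = pvCFilter (fun v => c v + rs.count v) l := by
  induction rs generalizing c l with
  | nil => simp
  | cons r rs ih =>
    simp only [List.foldl_cons]
    rw [ih, pvCFilter_rem]
    congr 1
    funext v
    by_cases hv : v = r <;> simp [hv, List.count_cons] <;> omega

theorem pvFoldlRem_cfilter (rs : List Int) (l : List Int) :
    rs.foldl pvRem l = pvCFilter (fun v => rs.count v) l := by
  have h := pvFoldlRem_cfilter_gen rs (fun _ => 0) l
  rw [pvCFilter_zero] at h
  simpa using h

-- A's fold over raw string values = rem-fold over the int-convertible ones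
theorem pvFoldl_remOrKeep (vs : List String) (l : List Int) :
    vs.foldl pvRemOrKeep l = (vs.filterMap PySem.Int.ofStr?).foldl pvRem l := by
  induction vs generalizing l with
  | nil => rfl
  | cons v vs ih =>
    simp only [List.foldl_cons, List.filterMap_cons]
    cases h : PySem.Int.ofStr? v <;> simp [pvRemOrKeep, h, ih, pvRem]

-- B's base counter counts the int-convertible values
theorem pvFoldl_bumpIf (vs : List String) (d : PySem.Dict Int Int) :
    vs.foldl pvBumpIf d = (vs.filterMap PySem.Int.ofStr?).foldl (fun d n => d.insert n (d.getD n 0 + 1)) d := by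
  induction vs generalizing d with
  | nil => rfl
  | cons v vs ih =>
    simp only [List.foldl_cons, List.filterMap_cons]
    cases h : PySem.Int.ofStr? v <;> simp [pvBumpIf, h, ih]

-- B's filtering pass = the abstract counter filter, for any dict consistent with c
theorem pvFoldl_filterStep (l : List Int) (acc : List Int) (d : PySem.Dict Int Int) (c : Int → Nat)
    (h : ∀ v, d.getD v 0 = (c v : Int)) :
    (l.foldl pvFilterStep (acc, d)).1 = acc ++ pvCFilter c l := by
  induction l generalizing acc d c with
  | nil => simp [pvCFilter]
  | cons x xs ih =>
    simp only [List.foldl_cons, pvFilterStep, h x, pvCFilter]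
    by_cases hc : 0 < c x
    · rw [if_pos (by exact_mod_cast hc), if_pos hc]
      exact ih acc _ _ (fun v => by rw [PySem.Dict.getD_insert, h v]; by_cases hv : v = x <;> simp [hv] <;> omega)
    · rw [if_neg (by exact_mod_cast hc), if_neg hc]
      rw [ih (acc ++ [x]) d c h]; simp

theorem pvBase_consistent (vs : List String) (v : Int) :
    (vs.foldl pvBumpIf PySem.Dict.empty).getD v 0 = ((vs.filterMap PySem.Int.ofStr?).count v : Int) := by
  rw [pvFoldl_bumpIf, PySem.Dict.getD_foldl_insert_add_one]
  simp [PySem.Dict.getD_empty]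

-- one row: B's counter-filter pass equals A's repeated remove chain
theorem pvRow_eq (inVals outVals : List String) (digOpt : Option Char) (row0 : List Int) :
    (row0.foldl pvFilterStep ([],
        (match digOpt with
         | none => (inVals ++ outVals).foldl pvBumpIf PySem.Dict.empty
         | some c =>
           match PySem.Int.ofChars? [c] with
           | none => (inVals ++ outVals).foldl pvBumpIf PySem.Dict.empty
           | some n => ((inVals ++ outVals).foldl pvBumpIf PySem.Dict.empty).insert n
               (((inVals ++ outVals).foldl pvBumpIf PySem.Dict.empty).getD n 0 + 1)))).1
    = (match digOpt with
       | none => outVals.foldl pvRemOrKeep (inVals.foldl pvRemOrKeep row0)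
       | some c =>
         match PySem.Int.ofChars? [c] with
         | none => outVals.foldl pvRemOrKeep (inVals.foldl pvRemOrKeep row0)
         | some n => (PySem.List.remove? (outVals.foldl pvRemOrKeep (inVals.foldl pvRemOrKeep row0)) n).getD
             (outVals.foldl pvRemOrKeep (inVals.foldl pvRemOrKeep row0))) := by
  have hps : outVals.foldl pvRemOrKeep (inVals.foldl pvRemOrKeep row0)
      = ((inVals ++ outVals).filterMap PySem.Int.ofStr?).foldl pvRem row0 := by
    rw [pvFoldl_remOrKeep, pvFoldl_remOrKeep, List.filterMap_append, List.foldl_append]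
  have hbase : ∀ v, ((inVals ++ outVals).foldl pvBumpIf PySem.Dict.empty).getD v 0
      = ((((inVals ++ outVals).filterMap PySem.Int.ofStr?).count v : Nat) : Int) :=
    fun v => pvBase_consistent (inVals ++ outVals) v
  rcases digOpt with _ | c
  · rw [pvFoldl_filterStep row0 [] _ (fun v => ((inVals ++ outVals).filterMap PySem.Int.ofStr?).count v) hbase]
    rw [hps, pvFoldlRem_cfilter]
    simp
  · cases h : PySem.Int.ofChars? [c] with
    | none =>
      simp only [h]
      rw [pvFoldl_filterStep row0 [] _ (fun v => ((inVals ++ outVals).filterMap PySem.Int.ofStr?).count v) hbase]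
      rw [hps, pvFoldlRem_cfilter]
      simp
    | some n =>
      simp only [h]
      have hcnt : ∀ v, (((inVals ++ outVals).foldl pvBumpIf PySem.Dict.empty).insert n
          (((inVals ++ outVals).foldl pvBumpIf PySem.Dict.empty).getD n 0 + 1)).getD v 0
          = (((((inVals ++ outVals).filterMap PySem.Int.ofStr?) ++ [n]).count v : Nat) : Int) := by
        intro v
        rw [PySem.Dict.getD_insert, hbase n, hbase v]
        by_cases hv : v = n
        · subst hv
          simp [List.count_append]
          omega
        · simp [hv, List.count_append, Ne.symm hv]
      rw [pvFoldl_filterStep row0 [] _ _ hcnt]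
      have hrem : (PySem.List.remove? (outVals.foldl pvRemOrKeep (inVals.foldl pvRemOrKeep row0)) n).getD
          (outVals.foldl pvRemOrKeep (inVals.foldl pvRemOrKeep row0))
          = (((inVals ++ outVals).filterMap PySem.Int.ofStr?) ++ [n]).foldl pvRem row0 := by
        rw [List.foldl_append, ← hps]
        rfl
      rw [List.nil_append, ← pvFoldlRem_cfilter, ← hrem]

-- ===== VERDICT (by name: the statement is the Claim_ definition above) =====
theorem temp_possible_finder_spec : Claim_equal_temp_possible_finder := by
  intro possible ipd opd lgf hdom hpre
  unfold Pre_temp_possible_finder at hpre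
  unfold Spec_temp_possible_finder
  rcases possible with _ | ⟨a, possible⟩; · simp at hpre
  rcases possible with _ | ⟨b, possible⟩; · simp at hpre
  rcases possible with _ | ⟨c, possible⟩; · simp at hpre
  rcases possible with _ | ⟨d, possible⟩; · simp at hpre
  rcases possible with _ | ⟨e, rest⟩; · simp at hpre
  have hRange : PySem.List.pyRange 0 5 1 = [0, 1, 2, 3, 4] := by decide
  have hslice : PySem.List.slice (a::b::c::d::e::rest) (some 5) none = rest := by
    rw [PySem.List.slice_from _ (show (0:Int) ≤ 5 by norm_num)]
    rfl
  simp only [temp_possible_finder, temp_possible_finder_alt, hRange, hslice,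
    List.foldl_cons, List.foldl_nil, PySem.List.pyGet?_ofNat',
    (show (0:Int).toNat = 0 from rfl), (show (1:Int).toNat = 1 from rfl),
    (show (2:Int).toNat = 2 from rfl), (show (3:Int).toNat = 3 from rfl),
    (show (4:Int).toNat = 4 from rfl)]
  simp only [List.set, List.getElem?_cons_zero, List.getElem?_cons_succ, Option.getD_some,
    List.nil_append, List.cons_append]
  rw [pvRow_eq, pvRow_eq, pvRow_eq, pvRow_eq, pvRow_eq]
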